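-- pv_equiv track=rewrite | github.com/Bonialeart/app_dibujo_proyecto-main | tools/rename_textures.py | generate_new_name
-- ===== SOURCE A (Python) =====
-- RENAME_MAP = {
--     # Generated / Shapes
--     "tip_generated_soft.png": "shape_soft_circle.png",
--     "tip_generated_hard.png": "shape_hard_circle.png",
--     "tip_generated_bristle.png": "shape_bristle.png",
--     "tip_generated_splatter.png": "shape_splatter.png",
--     "tip_generated_textured.png": "shape_textured.png",
--     "tip_painting_round_brush.png": "shape_round.png", # The replaced one
--     "tip_airbrushing_soft_airbrush.png": "shape_airbrush_soft.png", # The replaced one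
--
--     # Common Tips
--     "tip_pencil.png": "tip_pencil_texture.png",
--     "tip_hard.png": "tip_hard_round.png",
--     "tip_soft.png": "tip_soft_round.png",
--     "tip_square.png": "tip_square.png",
--     "tip_bristle.png": "tip_bristle_generic.png",
--
--     # Paper/Grains
--     "paper_grain.png": "grain_paper_standard.png",
--     "watercolor_paper.png": "grain_watercolor_paper.png",
--     "canvas_weave.png": "grain_canvas_weave.png",
--
--     # Sketching
--     "tip_sketching_hb_pencil.png": "pencil_hb.png",
--     "tip_sketching_6b_real_pencil.png": "pencil_6b_real.png",
--
--     # Painting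
--     "tip_painting_flat_brush.png": "paint_flat.png",
--     "tip_painting_fan_brush.png": "paint_fan.png",
--     "tip_painting_dry_brush.png": "paint_dry.png",
--
--     # Inking
--     "tip_inking_g_pen.png": "ink_g_pen.png",
--     "tip_inking_real_g_pen.png": "ink_real_g_pen.png",
--
--     # We remove 'tip_' prefix generally if not caught above
-- }
--
-- def generate_new_name(old_name):
--     if old_name in RENAME_MAP:
--         return RENAME_MAP[old_name]
--
--     # Generic Rules
--     new_name = old_name
--
--     # Remove 'tip_' prefix
--     if new_name.startswith("tip_"):
--         new_name = new_name[4:]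
--
--     # Simplify categories
--     # pattern: category_rest.png
--     categories = ["painting_", "sketching_", "inking_", "airbrushing_", "calligraphy_", "artistic_", "charcoal_", "drawing_", "elements_", "industrial_", "luminance_", "sprays_", "textures_", "vintage_"]
--
--     for cat in categories:
--         if new_name.startswith(cat):
--             new_name = new_name[len(cat):]
--             break
--
--     return new_name
-- ===== SOURCE B (Python) =====
-- RENAME_MAP = {
--     "tip_generated_soft.png": "shape_soft_circle.png",
--     "tip_generated_hard.png": "shape_hard_circle.png",
--     "tip_generated_bristle.png": "shape_bristle.png",
--     "tip_generated_splatter.png": "shape_splatter.png",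
--     "tip_generated_textured.png": "shape_textured.png",
--     "tip_painting_round_brush.png": "shape_round.png",
--     "tip_airbrushing_soft_airbrush.png": "shape_airbrush_soft.png",
--     "tip_pencil.png": "tip_pencil_texture.png",
--     "tip_hard.png": "tip_hard_round.png",
--     "tip_soft.png": "tip_soft_round.png",
--     "tip_square.png": "tip_square.png",
--     "tip_bristle.png": "tip_bristle_generic.png",
--     "paper_grain.png": "grain_paper_standard.png",
--     "watercolor_paper.png": "grain_watercolor_paper.png",
--     "canvas_weave.png": "grain_canvas_weave.png",
--     "tip_sketching_hb_pencil.png": "pencil_hb.png",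
--     "tip_sketching_6b_real_pencil.png": "pencil_6b_real.png",
--     "tip_painting_flat_brush.png": "paint_flat.png",
--     "tip_painting_fan_brush.png": "paint_fan.png",
--     "tip_painting_dry_brush.png": "paint_dry.png",
--     "tip_inking_g_pen.png": "ink_g_pen.png",
--     "tip_inking_real_g_pen.png": "ink_real_g_pen.png",
-- }
--
-- CATEGORIES = {"painting_", "sketching_", "inking_", "airbrushing_", "calligraphy_",
--               "artistic_", "charcoal_", "drawing_", "elements_", "industrial_",
--               "luminance_", "sprays_", "textures_", "vintage_"}
--
-- def generate_new_name(old_name):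
--     if old_name in RENAME_MAP:
--         return RENAME_MAP[old_name]
--     name = old_name[4:] if old_name.startswith("tip_") else old_name
--     i = name.find("_")
--     if i != -1 and name[:i + 1] in CATEGORIES:
--         return name[i + 1:]
--     return name
-- ===== Notes on version B (the rewrite author's own statement) =====
-- stated objective: idiomatic
-- what changed: Replaces A's for-loop testing each of the 14 category prefixes with a single find of the first underscore and one set-membership test of the leading token (valid because every category is exactly one underscore-terminated token).
import Mathlib
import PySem

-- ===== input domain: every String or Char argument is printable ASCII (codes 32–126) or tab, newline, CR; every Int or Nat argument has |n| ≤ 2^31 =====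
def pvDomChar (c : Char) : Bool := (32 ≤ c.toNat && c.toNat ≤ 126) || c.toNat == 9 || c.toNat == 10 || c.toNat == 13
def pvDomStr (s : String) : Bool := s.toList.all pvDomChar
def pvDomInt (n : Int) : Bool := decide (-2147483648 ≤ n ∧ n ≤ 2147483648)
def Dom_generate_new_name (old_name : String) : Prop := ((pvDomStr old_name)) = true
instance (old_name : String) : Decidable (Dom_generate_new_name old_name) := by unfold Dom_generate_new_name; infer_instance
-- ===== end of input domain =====

-- B replaces A's linear scan over the 14 category prefixes by a single find of the
-- first '_' plus one set-membership test of the leading token (objective: idiomatic).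

-- ===== PORT A =====
def pvRenameMap : PySem.Dict String String := PySem.Dict.ofList [
  ("tip_generated_soft.png", "shape_soft_circle.png"),
  ("tip_generated_hard.png", "shape_hard_circle.png"),
  ("tip_generated_bristle.png", "shape_bristle.png"),
  ("tip_generated_splatter.png", "shape_splatter.png"),
  ("tip_generated_textured.png", "shape_textured.png"),
  ("tip_painting_round_brush.png", "shape_round.png"),
  ("tip_airbrushing_soft_airbrush.png", "shape_airbrush_soft.png"),
  ("tip_pencil.png", "tip_pencil_texture.png"),
  ("tip_hard.png", "tip_hard_round.png"),
  ("tip_soft.png", "tip_soft_round.png"),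
  ("tip_square.png", "tip_square.png"),
  ("tip_bristle.png", "tip_bristle_generic.png"),
  ("paper_grain.png", "grain_paper_standard.png"),
  ("watercolor_paper.png", "grain_watercolor_paper.png"),
  ("canvas_weave.png", "grain_canvas_weave.png"),
  ("tip_sketching_hb_pencil.png", "pencil_hb.png"),
  ("tip_sketching_6b_real_pencil.png", "pencil_6b_real.png"),
  ("tip_painting_flat_brush.png", "paint_flat.png"),
  ("tip_painting_fan_brush.png", "paint_fan.png"),
  ("tip_painting_dry_brush.png", "paint_dry.png"),
  ("tip_inking_g_pen.png", "ink_g_pen.png"),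
  ("tip_inking_real_g_pen.png", "ink_real_g_pen.png")]

def pvCats : List String :=
  ["painting_", "sketching_", "inking_", "airbrushing_", "calligraphy_", "artistic_",
   "charcoal_", "drawing_", "elements_", "industrial_", "luminance_", "sprays_",
   "textures_", "vintage_"]

-- A's for-loop over the categories (break after the first match)
def pvCatLoop : List String → String → String
  | [], n => n
  | c :: cs, n =>
    if PySem.Str.startswith n c then PySem.Str.slice n (some (PySem.Str.len c)) none
    else pvCatLoop cs n

def generate_new_name (old_name : String) : String :=
  match pvRenameMap.get? old_name with
  | some v => v
  | none =>
    let new_name := old_name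
    let new_name :=
      if PySem.Str.startswith new_name "tip_" then PySem.Str.slice new_name (some 4) none
      else new_name
    pvCatLoop pvCats new_name

-- ===== PORT B =====
-- the category set (distinct elements)
def pvCatSet : List String :=
  ["painting_", "sketching_", "inking_", "airbrushing_", "calligraphy_", "artistic_",
   "charcoal_", "drawing_", "elements_", "industrial_", "luminance_", "sprays_",
   "textures_", "vintage_"]

def generate_new_name_alt (old_name : String) : String :=
  match pvRenameMap.get? old_name with
  | some v => v
  | none =>
    let name :=
      if PySem.Str.startswith old_name "tip_" then PySem.Str.slice old_name (some 4) none
      else old_name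
    let i := PySem.Str.find name "_"
    if i ≠ -1 ∧ PySem.Str.slice name none (some (i + 1)) ∈ pvCatSet then
      PySem.Str.slice name (some (i + 1)) none
    else name

-- ===== PRECONDITION & SPEC =====
def Spec_generate_new_name (old_name : String) (out : String) : Prop := out = generate_new_name_alt old_name
instance (old_name : String) (out : String) : Decidable (Spec_generate_new_name old_name out) := by unfold Spec_generate_new_name; infer_instance

-- ===== CLAIM (what is proved, stated in full; the proofs are below) =====
def Claim_equal_generate_new_name : Prop := ∀ (old_name : String), Dom_generate_new_name old_name → Spec_generate_new_name old_name (generate_new_name old_name)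

-- ===== LEMMAS AND PROOFS =====

-- the first '_' of w ++ '_' :: rest is at index w.length when '_' ∉ w
lemma pvFind_underscore (w rest : List Char) (hw : '_' ∉ w) :
    PySem.Chars.find (w ++ '_' :: rest) ['_'] = (w.length : Int) := by
  set l := w ++ '_' :: rest with hl
  have hinf : ['_'] <:+: l := ⟨w, rest, by simp [hl]⟩
  have hne : PySem.Chars.find l ['_'] ≠ -1 := by
    rw [Ne, PySem.Chars.find_eq_neg_one_iff]; simpa using hinf
  have hspec := PySem.Chars.findFrom_natCast_spec l ['_'] 0 (by simp)
    (by rw [Nat.cast_zero, PySem.Chars.findFrom_zero]; exact hne)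
  rw [Nat.cast_zero, PySem.Chars.findFrom_zero] at hspec
  obtain ⟨h0, hpre, hmin⟩ := hspec
  set j := (PySem.Chars.find l ['_']).toNat with hj
  have hju : l[j]? = some '_' := by
    obtain ⟨t, ht⟩ := hpre
    have : (List.drop j l)[0]? = some '_' := by rw [← ht]; rfl
    simpa [List.getElem?_drop] using this
  have hjle : j ≤ w.length := by
    by_contra hgt
    rw [not_le] at hgt
    exact hmin w.length (Nat.zero_le _) hgt ⟨rest, by simp [hl]⟩
  have hjge : ¬ j < w.length := by
    intro hlt
    have : l[j]? = w[j]? := by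
      rw [hl]; exact List.getElem?_append_left hlt
    rw [this] at hju
    exact hw (List.mem_of_getElem? hju)
  have hjeq : j = w.length := by omega
  have : (0 : Int) ≤ PySem.Chars.find l ['_'] := by exact_mod_cast h0
  omega

-- A's category scan equals B's find-token-membership test, for any category list
-- whose elements are each a single '_'-free word followed by '_'
lemma pvCatLoop_eq (cats : List String)
    (h : ∀ c ∈ cats, ∃ w, c.toList = w ++ ['_'] ∧ '_' ∉ w) (n : String) :
    pvCatLoop cats n =
      (if PySem.Str.find n "_" ≠ -1 ∧
          PySem.Str.slice n none (some (PySem.Str.find n "_" + 1)) ∈ cats then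
        PySem.Str.slice n (some (PySem.Str.find n "_" + 1)) none
      else n) := by
  induction cats with
  | nil => simp [pvCatLoop]
  | cons c cs ih =>
    have hc := h c (List.mem_cons_self ..)
    obtain ⟨w, hcw, hwmem⟩ := hc
    by_cases hs : PySem.Str.startswith n c = true
    · -- c is a prefix of n: the loop strips c; find lands right after w
      have hpre : c.toList <+: n.toList := by
        rw [PySem.Str.startswith_eq] at hs
        exact (PySem.Chars.startswith_iff _ _).mp hs
      obtain ⟨rest, hrest⟩ := hpre
      have hnl : n.toList = w ++ '_' :: rest := by
        rw [← hrest, hcw]; simp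
      have hfind : PySem.Str.find n "_" = (w.length : Int) := by
        rw [PySem.Str.find_eq, hnl]
        exact pvFind_underscore w rest hwmem
      have hlen : c.toList.length = w.length + 1 := by simp [hcw]
      have htok : PySem.Str.slice n none (some (PySem.Str.find n "_" + 1)) = c := by
        apply String.toList_inj.mp
        rw [PySem.Str.toList_slice, hfind]
        rw [show ((w.length : Int) + 1) = ((w.length + 1 : Nat) : Int) by push_cast; ring]
        rw [PySem.Chars.slice_eq_listSlice, PySem.List.slice_to_natCast, hnl, hcw]
        simp [List.take_append]
      have hcond : PySem.Str.find n "_" ≠ -1 ∧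
          PySem.Str.slice n none (some (PySem.Str.find n "_" + 1)) ∈ c :: cs := by
        refine ⟨by rw [hfind]; omega, by rw [htok]; exact List.mem_cons_self ..⟩
      rw [pvCatLoop, if_pos hs, if_pos hcond]
      have hL : PySem.Str.len c = ((w.length : Int) + 1) := by
        rw [PySem.Str.len_eq, hlen]; push_cast; ring
      rw [hfind, hL]
    · -- c is not a prefix: the token (a prefix of n) cannot be c
      rw [pvCatLoop, if_neg hs, ih (fun c' hc' => h c' (List.mem_cons_of_mem _ hc'))]
      refine if_congr ?_ rfl rfl
      constructor
      · rintro ⟨hP, hM⟩; exact ⟨hP, List.mem_cons_of_mem _ hM⟩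
      · rintro ⟨hP, hM⟩
        refine ⟨hP, ?_⟩
        rcases List.mem_cons.mp hM with heq | hIn
        · exfalso
          have hnn : (0 : Int) ≤ PySem.Str.find n "_" := by
            have hspec := PySem.Chars.findFrom_natCast_spec n.toList ("_" : String).toList 0
              (by simp) (by rw [Nat.cast_zero, PySem.Chars.findFrom_zero, ← PySem.Str.find_eq]; exact hP)
            rw [Nat.cast_zero, PySem.Chars.findFrom_zero, ← PySem.Str.find_eq] at hspec
            exact_mod_cast hspec.1
          have hpre : c.toList <+: n.toList := by
            rw [← heq, PySem.Str.toList_slice, PySem.Chars.slice_eq_listSlice,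
              PySem.List.slice_to n.toList (by omega : (0:Int) ≤ PySem.Str.find n "_" + 1)]
            exact List.take_prefix _ _
          exact hs (by rw [PySem.Str.startswith_eq]
                       exact (PySem.Chars.startswith_iff _ _).mpr hpre)
        · exact hIn

lemma pvCats_shape : ∀ c ∈ pvCats, ∃ w, c.toList = w ++ ['_'] ∧ '_' ∉ w := by
  intro c hc
  refine ⟨c.toList.dropLast, ?_, ?_⟩ <;> fin_cases hc <;> decide

-- ===== VERDICT (by name: the statement is the Claim_ definition above) =====
theorem generate_new_name_spec : Claim_equal_generate_new_name := by
  intro s _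
  unfold Spec_generate_new_name generate_new_name generate_new_name_alt
  cases hm : pvRenameMap.get? s with
  | some v => rfl
  | none =>
    simp only
    have hset : pvCatSet = pvCats := rfl
    rw [hset]
    exact pvCatLoop_eq pvCats pvCats_shape _
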